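-- pv_equiv track=rewrite | github.com/Saren-Arterius/ABCDEFGHPPP | Advance/python-permutation-bruteforce-parallel/abcdefghppp.py | check_last_8
-- ===== SOURCE A (Python) =====
-- from string import digits, ascii_letters
-- from collections import Counter
--
-- BASE = 20 # 17 or up
--
-- WIDTH = 4
--
-- PPPPP = int('11111', BASE)
--
-- NUMERALS = digits + ascii_letters
--
-- def baseN(num):
--     return ((num == 0) and NUMERALS[0]) or (baseN(num // BASE).lstrip(NUMERALS[0]) + NUMERALS[num % BASE])
--
-- def check_last_8(ΝΞΟΠ):
--     ΙΚΛΜ = PPPPP - ΝΞΟΠ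
--     c = Counter()
--     c.update(baseN(ΙΚΛΜ * (BASE ** WIDTH) + ΝΞΟΠ))
--     for i in c.items():
--         if i[0] == '1' or i[1] > 1:
--             return 0
--     return ΙΚΛΜ
-- ===== SOURCE B (Python) =====
-- from string import digits, ascii_letters
--
-- BASE = 20  # 17 or up
--
-- WIDTH = 4
--
-- PPPPP = int('11111', BASE)
--
--
-- def check_last_8(ΝΞΟΠ):
--     ΙΚΛΜ = PPPPP - ΝΞΟΠ
--     v = ΙΚΛΜ * BASE ** WIDTH + ΝΞΟΠ
--     seen = set()
--     while v > 0:
--         d = v % BASE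
--         if d == 1 or d in seen:
--             return 0
--         seen.add(d)
--         v //= BASE
--     return ΙΚΛΜ
-- ===== Notes on version B (the rewrite author's own statement) =====
-- stated objective: alternative
-- what changed: Replaces the recursive base-20 string construction plus Counter tally plus items re-scan with a single arithmetic loop that extracts digits with % and // while maintaining a seen-set and exits at the first digit 1 or repeat; Pre_ excludes the inputs above 168422, where the encoded value is negative and A's baseN recursion never terminates (RecursionError).
-- outside the precondition, e.g. on check_last_8(168423): A raises RecursionError, B returns -2
import Mathlib
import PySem

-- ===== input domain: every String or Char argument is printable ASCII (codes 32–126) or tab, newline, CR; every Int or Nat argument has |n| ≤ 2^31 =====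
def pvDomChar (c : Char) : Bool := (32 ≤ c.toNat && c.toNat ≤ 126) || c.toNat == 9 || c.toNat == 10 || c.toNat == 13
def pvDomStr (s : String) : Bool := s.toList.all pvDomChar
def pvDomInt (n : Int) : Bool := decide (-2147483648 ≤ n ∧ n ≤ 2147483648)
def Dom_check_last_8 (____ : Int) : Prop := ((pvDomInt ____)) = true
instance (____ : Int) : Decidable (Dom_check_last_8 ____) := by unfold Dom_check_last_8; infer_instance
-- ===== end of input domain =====

-- B replaces A's recursive base-20 string build + Counter tally + items re-scan by one
-- digit-extraction loop with a seen-set and early exit.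


-- ===== PORT A =====
-- NUMERALS = digits + ascii_letters
def pvNUMERALS : List Char :=
  "0123456789abcdefghijklmnopqrstuvwxyzABCDEFGHIJKLMNOPQRSTUVWXYZ".toList

-- baseN, step for step; strings are carried as List Char (PySem's representation).
-- .lstrip(NUMERALS[0]) strips the leading '0' characters = dropWhile (· == '0'), exact for a
-- one-character strip set.  The recursion is run on fuel: 64 exceeds the recursion depth on
-- every input Pre_ admits (value < 20^63); for num < 0 the Python recursion never terminates
-- (RecursionError) and Pre_ excludes exactly those inputs, so fuel 0 is never reached.
def pvBaseN (fuel : Nat) (num : Int) : List Char :=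
  match fuel with
  | 0 => []
  | f + 1 =>
    if num = 0 then ['0']
    else ((pvBaseN f (PySem.Int.floordiv num 20)).dropWhile (fun c => c == '0'))
         ++ [PySem.List.pyGetD pvNUMERALS (PySem.Int.mod num 20) ' ']

def check_last_8 (n : Int) : Int :=
  let iklm : Int := 168421 - n                  -- ΙΚΛΜ = PPPPP - ΝΞΟΠ, PPPPP = int('11111', 20) = 168421
  let s := pvBaseN 64 (iklm * 20 ^ 4 + n)       -- baseN(ΙΚΛΜ * BASE ** WIDTH + ΝΞΟΠ)
  let c := PySem.Dict.counter s                 -- c = Counter(); c.update(s)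
  -- for i in c.items(): if i[0] == '1' or i[1] > 1: return 0   /   return ΙΚΛΜ
  if c.items.any (fun i => i.1 == '1' || decide (1 < i.2)) then 0 else iklm

-- ===== PORT B =====
-- while v > 0: d = v % BASE; if d == 1 or d in seen: return 0; seen.add(d); v //= BASE
def pvAltLoop (v : Int) (seen : PySem.Set Int) (iklm : Int) : Int :=
  if h : 0 < v then
    let d := PySem.Int.mod v 20
    if d == 1 || PySem.Set.contains seen d then 0
    else pvAltLoop (PySem.Int.floordiv v 20) (PySem.Set.add seen d) iklm
  else iklm
termination_by v.toNat
decreasing_by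
  rw [PySem.Int.floordiv_eq_ediv_of_pos (by norm_num : (0:Int) < 20)]
  omega

def check_last_8_alt (n : Int) : Int :=
  let iklm : Int := 168421 - n
  let v : Int := iklm * 20 ^ 4 + n
  pvAltLoop v PySem.Set.empty iklm

-- ===== PRECONDITION & SPEC =====
-- For ΝΞΟΠ ≥ 168423 the encoded value ΙΚΛΜ*20^4 + ΝΞΟΠ is negative and A's baseN recursion
-- never terminates (Python RecursionError): Pre_ excludes exactly those inputs, on which A
-- never returns a value.
def Pre_check_last_8 (____ : Int) : Prop := ____ ≤ 168422
instance (____ : Int) : Decidable (Pre_check_last_8 ____) := by unfold Pre_check_last_8; infer_instance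
def pvWitness_check_last_8 : Int := (0)

def Spec_check_last_8 (____ : Int) (out : Int) : Prop := out = check_last_8_alt ____
instance (____ : Int) (out : Int) : Decidable (Spec_check_last_8 ____ out) := by unfold Spec_check_last_8; infer_instance

-- ===== CLAIM (what is proved, stated in full; the proofs are below) =====
def Claim_equal_check_last_8 : Prop := ∀ (____ : Int), Dom_check_last_8 ____ → Pre_check_last_8 ____ → Spec_check_last_8 ____ (check_last_8 ____)

-- ===== LEMMAS AND PROOFS =====

-- the character NUMERALS[d] assigned to digit d  (proof-side helper)
def pvNumch (d : Nat) : Char := pvNUMERALS.getD d ' '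

theorem pvNumch_ne_zero : ∀ d : Nat, d < 20 → d ≠ 0 → (pvNumch d == '0') = false := by decide

theorem pvNumch_eq_one_iff : ∀ d : Nat, d < 20 → (pvNumch d = '1' ↔ d = 1) := by decide

theorem pvNumch_injOn : ∀ d : Nat, d < 20 → ∀ e : Nat, e < 20 → pvNumch d = pvNumch e → d = e := by decide

theorem pv_dropWhile_digits (q : Nat) (hq : q ≠ 0) :
    ((Nat.digits 20 q).reverse.map pvNumch).dropWhile (fun c => c == '0')
      = (Nat.digits 20 q).reverse.map pvNumch := by
  have hne : Nat.digits 20 q ≠ [] := Nat.digits_ne_nil_iff_ne_zero.mpr hq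
  have hner : (Nat.digits 20 q).reverse ≠ [] := by simpa using hne
  cases hL : (Nat.digits 20 q).reverse with
  | nil => exact absurd hL hner
  | cons a t =>
    have ha : a ∈ Nat.digits 20 q := by
      have : a ∈ (Nat.digits 20 q).reverse := by rw [hL]; exact List.mem_cons_self
      simpa using this
    have halt : a < 20 := Nat.digits_lt_base (by norm_num) ha
    have ha0 : a ≠ 0 := by
      have := Nat.getLast_digit_ne_zero 20 hq
      have hgl : ((Nat.digits 20 q).reverse).head hner = a := by simp [hL]
      rw [List.head_reverse] at hgl
      rwa [hgl] at this
    simp [pvNumch_ne_zero a halt ha0]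

theorem pv_mod_natCast (m : Nat) : PySem.Int.mod (m : Int) 20 = ((m % 20 : Nat) : Int) := by
  rw [PySem.Int.mod_eq_emod_of_pos (by norm_num)]; push_cast; ring

theorem pv_floordiv_natCast (m : Nat) : PySem.Int.floordiv (m : Int) 20 = ((m / 20 : Nat) : Int) := by
  rw [PySem.Int.floordiv_eq_ediv_of_pos (by norm_num)]; push_cast; ring

theorem pv_baseN_eq (f : Nat) : ∀ m : Nat, m < 20 ^ f →
    pvBaseN (f + 1) (m : Int) = if m = 0 then ['0'] else (Nat.digits 20 m).reverse.map pvNumch := by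
  induction f with
  | zero =>
    intro m hm
    interval_cases m
    simp [pvBaseN]
  | succ f ih =>
    intro m hm
    by_cases h0 : m = 0
    · simp [h0, pvBaseN]
    · rw [if_neg h0]
      have hcast : ((m : Int) = 0) = False := by simp [h0]
      show pvBaseN (f + 1 + 1) (m : Int) = _
      rw [pvBaseN]
      rw [if_neg (by exact_mod_cast h0)]
      rw [pv_floordiv_natCast, pv_mod_natCast, PySem.List.pyGetD_natCast]
      rw [ih (m / 20) (Nat.div_lt_of_lt_mul (by rw [pow_succ, Nat.mul_comm] at hm; exact hm))]
      rw [Nat.digits_def' (by norm_num : 1 < 20) (Nat.pos_of_ne_zero h0)]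
      by_cases hq : m / 20 = 0
      · rw [if_pos hq]
        simp [hq, pvNumch]
      · rw [if_neg hq, pv_dropWhile_digits (m / 20) hq]
        simp [pvNumch]

def pvHasBad (ds : List Int) (seen : PySem.Set Int) : Bool :=
  match ds with
  | [] => false
  | d :: ds => d == 1 || PySem.Set.contains seen d || pvHasBad ds (PySem.Set.add seen d)

theorem pv_altLoop_eq (m : Nat) : ∀ (seen : PySem.Set Int) (iklm : Int),
    pvAltLoop (m : Int) seen iklm
      = if pvHasBad ((Nat.digits 20 m).map (fun d => Int.ofNat d)) seen then 0 else iklm := by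
  induction m using Nat.strong_induction_on with
  | _ m ih =>
    intro seen iklm
    by_cases h0 : m = 0
    · subst h0
      rw [pvAltLoop]
      simp [pvHasBad]
    · rw [pvAltLoop, dif_pos (by exact_mod_cast Nat.pos_of_ne_zero h0)]
      rw [pv_mod_natCast, pv_floordiv_natCast]
      rw [Nat.digits_def' (by norm_num : 1 < 20) (Nat.pos_of_ne_zero h0), List.map_cons, pvHasBad]
      have hcast : ((m % 20 : Nat) : Int) = Int.ofNat (m % 20) := rfl
      rw [hcast]
      by_cases hbad : (Int.ofNat (m % 20) == 1 || PySem.Set.contains seen (Int.ofNat (m % 20))) = true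
      · rw [if_pos hbad, hbad, Bool.true_or, if_pos rfl]
      · rw [if_neg hbad]
        rw [ih (m / 20) (Nat.div_lt_self (Nat.pos_of_ne_zero h0) (by norm_num))]
        rw [Bool.not_eq_true] at hbad
        rw [hbad, Bool.false_or]

theorem pv_hasBad_iff (ds : List Int) : ∀ seen : PySem.Set Int,
    pvHasBad ds seen = true ↔ (1 : Int) ∈ ds ∨ ¬ ds.Nodup ∨ ∃ d ∈ ds, PySem.Set.contains seen d = true := by
  induction ds with
  | nil => intro seen; simp [pvHasBad]
  | cons d ds ih =>
    intro seen
    simp only [pvHasBad, Bool.or_eq_true, beq_iff_eq, PySem.Set.contains_iff, PySem.Set.mem_add,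
      ih, List.mem_cons, List.nodup_cons]
    constructor
    · rintro ((h | h) | h1 | hnd | ⟨e, he, hc | hc⟩)
      · exact Or.inl (Or.inl h.symm)
      · exact Or.inr (Or.inr ⟨d, Or.inl rfl, h⟩)
      · exact Or.inl (Or.inr h1)
      · exact Or.inr (Or.inl (by tauto))
      · exact Or.inr (Or.inr ⟨e, Or.inr he, hc⟩)
      · subst hc; exact Or.inr (Or.inl (by tauto))
    · rintro ((h | h) | hnd | ⟨e, (he | he), hc⟩)
      · exact Or.inl (Or.inl h.symm)
      · exact Or.inr (Or.inl h)
      · by_cases hmem : d ∈ ds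
        · exact Or.inr (Or.inr (Or.inr ⟨d, hmem, Or.inr rfl⟩))
        · exact Or.inr (Or.inr (Or.inl (fun hd => hnd ⟨hmem, hd⟩)))
      · subst he; exact Or.inl (Or.inr hc)
      · exact Or.inr (Or.inr (Or.inr ⟨e, he, Or.inl hc⟩))

theorem pv_counter_any (s : List Char) :
    ((PySem.Dict.counter s).items.any (fun i => i.1 == '1' || decide (1 < i.2)) = true) ↔ ('1' ∈ s ∨ ¬ s.Nodup) := by
  rw [PySem.Dict.items_counter, List.any_map]
  simp only [List.any_eq_true, PySem.Set.mem_ofList, Function.comp, beq_iff_eq, Bool.or_eq_true,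
    decide_eq_true_eq]
  constructor
  · rintro ⟨k, hk, h | h⟩
    · exact Or.inl (h ▸ hk)
    · refine Or.inr (fun hnd => ?_)
      have := List.nodup_iff_count_le_one.mp hnd k
      omega
  · rintro (h | h)
    · exact ⟨'1', h, Or.inl rfl⟩
    · rw [List.nodup_iff_count_le_one] at h
      push_neg at h
      obtain ⟨k, hk⟩ := h
      exact ⟨k, List.count_pos_iff.mp (by omega), Or.inr (by exact_mod_cast hk)⟩

theorem pv_A_cond (m : Nat) :
    ((PySem.Dict.counter ((List.map pvNumch (Nat.digits 20 m)).reverse)).items.any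
        (fun i => i.1 == '1' || decide (1 < i.2)) = true)
      ↔ (1 ∈ Nat.digits 20 m ∨ ¬ (Nat.digits 20 m).Nodup) := by
  rw [pv_counter_any]
  have hall : ∀ d ∈ Nat.digits 20 m, d < 20 := fun d hd => Nat.digits_lt_base (by norm_num) hd
  rw [List.mem_reverse, List.nodup_reverse]
  constructor
  · rintro (h | h)
    · rw [List.mem_map] at h
      obtain ⟨d, hd, hch⟩ := h
      exact Or.inl (by rw [← (pvNumch_eq_one_iff d (hall d hd)).mp hch]; exact hd)
    · refine Or.inr (fun hnd => h ?_)
      exact (List.nodup_map_iff_inj_on hnd).mpr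
        (fun x hx y hy hxy => pvNumch_injOn x (hall x hx) y (hall y hy) hxy)
  · rintro (h | h)
    · exact Or.inl (List.mem_map.mpr ⟨1, h, (pvNumch_eq_one_iff 1 (by norm_num)).mpr rfl⟩)
    · exact Or.inr (fun hnd => h hnd.of_map)

theorem pv_B_cond (m : Nat) :
    (pvHasBad ((Nat.digits 20 m).map (fun d => Int.ofNat d)) PySem.Set.empty = true)
      ↔ (1 ∈ Nat.digits 20 m ∨ ¬ (Nat.digits 20 m).Nodup) := by
  rw [pv_hasBad_iff]
  have hempty : ∀ d : Int, PySem.Set.contains PySem.Set.empty d = false := by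
    intro d
    simp [PySem.Set.empty, PySem.Set.contains]
  constructor
  · rintro (h | h | ⟨d, hd, hc⟩)
    · rw [List.mem_map] at h
      obtain ⟨d, hd, hcast⟩ := h
      have : d = 1 := by rw [Int.ofNat_eq_natCast] at hcast; exact_mod_cast hcast
      exact Or.inl (this ▸ hd)
    · refine Or.inr (fun hnd => h ((List.nodup_map_iff_inj_on hnd).mpr
        (fun x _ y _ hxy => by rw [Int.ofNat_eq_natCast, Int.ofNat_eq_natCast] at hxy; exact_mod_cast hxy)))
    · rw [hempty d] at hc; exact absurd hc (by simp)
  · rintro (h | h)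
    · exact Or.inl (List.mem_map.mpr ⟨1, h, rfl⟩)
    · exact Or.inr (Or.inl (fun hnd => h hnd.of_map))

-- ===== VERDICT (by name: the statement is the Claim_ definition above) =====
theorem check_last_8_spec : Claim_equal_check_last_8 := by
  intro n hdom hpre
  rw [Dom_check_last_8, pvDomInt, decide_eq_true_eq] at hdom
  rw [Pre_check_last_8] at hpre
  obtain ⟨h1, -⟩ := hdom
  have h2 : n ≤ 168422 := hpre
  show check_last_8 n = check_last_8_alt n
  have hpow : (20 : Int) ^ 4 = 160000 := by norm_num
  have hv : 0 < (168421 - n) * 20 ^ 4 + n := by rw [hpow]; omega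
  have hm : ((((168421 - n) * 20 ^ 4 + n).toNat : Int)) = (168421 - n) * 20 ^ 4 + n :=
    Int.toNat_of_nonneg (le_of_lt hv)
  set m : Nat := ((168421 - n) * 20 ^ 4 + n).toNat with hmdef
  have hm0 : m ≠ 0 := by omega
  have hmlt : m < 20 ^ 63 := by
    have hb : (m : Int) ≤ 370275819269632 := by rw [hm, hpow]; omega
    have hb2 : (20 : Nat) ^ 63 > 370275819269632 := by
      calc (370275819269632 : Nat) < 20 ^ 12 := by norm_num
        _ ≤ 20 ^ 63 := Nat.pow_le_pow_right (by norm_num) (by norm_num)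
    omega
  have hbase := pv_baseN_eq 63 m hmlt
  norm_num at hbase
  show (let iklm : Int := 168421 - n
        let s := pvBaseN 64 (iklm * 20 ^ 4 + n)
        let c := PySem.Dict.counter s
        if c.items.any (fun i => i.1 == '1' || decide (1 < i.2)) then 0 else iklm)
      = check_last_8_alt n
  simp only [check_last_8_alt]
  rw [← hm, hbase, if_neg hm0, pv_altLoop_eq m PySem.Set.empty (168421 - n)]
  by_cases hc : 1 ∈ Nat.digits 20 m ∨ ¬ (Nat.digits 20 m).Nodup
  · rw [if_pos ((pv_A_cond m).mpr hc), if_pos ((pv_B_cond m).mpr hc)]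
  · rw [if_neg (fun hh => hc ((pv_A_cond m).mp hh)), if_neg (fun hh => hc ((pv_B_cond m).mp hh))]
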